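-- pv_equiv track=rewrite | github.com/loukotaj/SmarterVote | pipeline/app/utils/ai_enrichment.py | _create_index_summary
-- ===== SOURCE A (Python) =====
-- def _create_index_summary(text: str) -> str:
--     """Create a compressed summary for indexing (120-180 words)."""
--     # Simple extractive summarization
--     sentences = [s.strip() for s in text.split(".") if s.strip()]
--
--     if not sentences:
--         return ""
--
--     # Take first few sentences up to word limit
--     summary_words = []
--     target_words = 150  # Aim for middle of 120-180 range
--
--     for sentence in sentences:
--         words = sentence.split()
--         if len(summary_words) + len(words) <= target_words:
--             summary_words.extend(words)
--         else:
--             # Add partial sentence if needed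
--             remaining_words = target_words - len(summary_words)
--             if remaining_words > 0:
--                 summary_words.extend(words[:remaining_words])
--             break
--
--     summary = " ".join(summary_words)
--
--     # Ensure minimum length
--     if len(summary.split()) < 50:
--         return text[:800] + "..." if len(text) > 800 else text
--
--     return summary
-- ===== SOURCE B (Python) =====
-- def _create_index_summary(text: str) -> str:
--     """Create a compressed summary for indexing (120-180 words)."""
--     # Flattening the sentence loop: the greedy per-sentence walk in A collects
--     # exactly the first 150 words of the text with '.' treated as whitespace.
--     words = text.replace(".", " ").split()
--     if not words:
--         return ""
--     if len(words) < 50: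
--         return text[:800] + "..." if len(text) > 800 else text
--     return " ".join(words[:150])
-- ===== Notes on version B (the rewrite author's own statement) =====
-- stated objective: simpler
-- what changed: Replaced the sentence split + greedy per-sentence word-budget loop by a direct computation: treat '.' as whitespace (replace then split), take the first 150 words, with the same short-text fallback expressed on the word count.
import Mathlib
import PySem

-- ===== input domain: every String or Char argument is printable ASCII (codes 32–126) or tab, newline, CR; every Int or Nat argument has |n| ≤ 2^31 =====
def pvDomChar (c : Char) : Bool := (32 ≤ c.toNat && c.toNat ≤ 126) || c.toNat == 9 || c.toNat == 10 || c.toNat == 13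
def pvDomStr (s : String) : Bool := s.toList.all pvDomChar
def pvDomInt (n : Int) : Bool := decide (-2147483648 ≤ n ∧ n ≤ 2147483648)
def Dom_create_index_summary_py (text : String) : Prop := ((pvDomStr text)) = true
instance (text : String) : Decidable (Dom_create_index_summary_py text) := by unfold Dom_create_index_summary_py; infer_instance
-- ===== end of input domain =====

-- B replaces A's sentence split + greedy per-sentence word-budget loop by "treat '.' as
-- whitespace, take the first 150 words" (objective: simpler; return value only).

-- ===== PORT A =====
-- the 'for sentence in sentences' loop with its break, accumulator summary_words
def pvALoop : List (List Char) → List (List Char) → List (List Char)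
  | [], acc => acc
  | s :: rest, acc =>
    let ws := PySem.Chars.split₀ s
    if (acc.length : Int) + (ws.length : Int) ≤ 150 then
      pvALoop rest (acc ++ ws)
    else
      if (150 : Int) - (acc.length : Int) > 0 then
        acc ++ PySem.List.slice ws none (some ((150 : Int) - (acc.length : Int)))
      else acc

def create_index_summary_py (text : String) : String :=
  let sentences := ((PySem.Chars.splitOn text.toList ['.']).map PySem.Chars.strip).filter
    (fun s => !s.isEmpty)
  if sentences.isEmpty then ""
  else
    let summary_words := pvALoop sentences []
    let summary := PySem.Chars.join [' '] summary_words
    if ((PySem.Chars.split₀ summary).length : Int) < 50 then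
      (if PySem.Str.len text > 800 then PySem.Str.slice text none (some 800) ++ "..." else text)
    else String.ofList summary

-- ===== PORT B =====
def create_index_summary_py_alt (text : String) : String :=
  let words := PySem.Chars.split₀ (PySem.Chars.replace text.toList ['.'] [' '])
  if words.isEmpty then ""
  else if (words.length : Int) < 50 then
    (if PySem.Str.len text > 800 then PySem.Str.slice text none (some 800) ++ "..." else text)
  else String.ofList (PySem.Chars.join [' '] (words.take 150))

-- ===== PRECONDITION & SPEC =====
def Spec_create_index_summary_py (text : String) (out : String) : Prop := out = create_index_summary_py_alt text
instance (text : String) (out : String) : Decidable (Spec_create_index_summary_py text out) := by unfold Spec_create_index_summary_py; infer_instance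

-- ===== CLAIM (what is proved, stated in full; the proofs are below) =====
def Claim_equal_create_index_summary_py : Prop := ∀ (text : String), Dom_create_index_summary_py text → Spec_create_index_summary_py text (create_index_summary_py text)

-- ===== LEMMAS AND PROOFS =====

-- '.'→' ' as a character map
def pvF (c : Char) : Char := if c = '.' then ' ' else c

def pvGW : List Char → List Char → List (List Char)
  | [], cur => if cur.isEmpty then [] else [cur.reverse]
  | c :: s, cur =>
    if PySem.Chars.isspace c then
      if cur.isEmpty then pvGW s [] else cur.reverse :: pvGW s []
    else pvGW s (c :: cur)
theorem pvGW_nil (cur : List Char) : pvGW [] cur = if cur.isEmpty then [] else [cur.reverse] := rfl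
theorem pvGW_cons_space {c : Char} (s cur : List Char) (h : PySem.Chars.isspace c = true) :
    pvGW (c :: s) cur = if cur.isEmpty then pvGW s [] else cur.reverse :: pvGW s [] := by
  simp [pvGW, h]
theorem pvGW_cons_nonspace {c : Char} (s cur : List Char) (h : PySem.Chars.isspace c = false) :
    pvGW (c :: s) cur = pvGW s (c :: cur) := by
  simp [pvGW, h]

theorem pvGW_nonspace (w : List Char) : ∀ cur, (∀ c ∈ w, PySem.Chars.isspace c = false) →
    pvGW w cur = pvGW [] (w.reverse ++ cur) := by
  induction w with
  | nil => intro cur _; rfl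
  | cons c w ih =>
    intro cur h
    rw [pvGW_cons_nonspace w cur (h c (by simp)), ih (c :: cur) (fun x hx => h x (by simp [hx]))]
    have : w.reverse ++ c :: cur = (c :: w).reverse ++ cur := by simp
    rw [this]

theorem pvGW_all_nonspace (w : List Char) (h : ∀ c ∈ w, PySem.Chars.isspace c = false) :
    pvGW w [] = if w = [] then [] else [w] := by
  rw [pvGW_nonspace w [] h, pvGW_nil]
  rcases w with _ | _ <;> simp

theorem pvGW_eq_nil (s : List Char) : ∀ cur, pvGW s cur = [] →
    cur = [] ∧ ∀ c ∈ s, PySem.Chars.isspace c = true := by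
  induction s with
  | nil =>
    intro cur h
    rw [pvGW_nil] at h
    constructor
    · by_cases hc : cur.isEmpty <;> simp_all
    · simp
  | cons c s ih =>
    intro cur h
    by_cases hs : PySem.Chars.isspace c = true
    · rw [pvGW_cons_space s cur hs] at h
      split at h
      · have := ih [] h
        exact ⟨by simp_all [List.isEmpty_iff], fun x hx => by
          rcases List.mem_cons.mp hx with hx | hx
          · simp_all
          · exact this.2 x hx⟩
      · simp at h
    · rw [pvGW_cons_nonspace s cur (Bool.eq_false_iff.mpr hs)] at h
      have := ih _ h
      simp at this

theorem pvGW_elems (s : List Char) : ∀ cur, (∀ c ∈ cur, PySem.Chars.isspace c = false) →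
    ∀ w ∈ pvGW s cur, w ≠ [] ∧ ∀ c ∈ w, PySem.Chars.isspace c = false := by
  induction s with
  | nil =>
    intro cur hc w hw
    rw [pvGW_nil] at hw
    split at hw
    · simp at hw
    · rename_i hne
      simp at hw
      subst hw
      refine ⟨by simp [List.isEmpty_iff] at hne ⊢; exact hne, ?_⟩
      intro c hcm; exact hc c (by simpa using hcm)
  | cons c s ih =>
    intro cur hc w hw
    by_cases hs : PySem.Chars.isspace c = true
    · rw [pvGW_cons_space s cur hs] at hw
      split at hw
      · exact ih [] (by simp) w hw
      · rename_i hne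
        rcases List.mem_cons.mp hw with hw | hw
        · subst hw
          refine ⟨by simp [List.isEmpty_iff] at hne ⊢; exact hne, ?_⟩
          intro x hx; exact hc x (by simpa using hx)
        · exact ih [] (by simp) w hw
    · rw [pvGW_cons_nonspace s cur (Bool.eq_false_iff.mpr hs)] at hw
      refine ih (c :: cur) ?_ w hw
      intro x hx
      rcases List.mem_cons.mp hx with hx | hx
      · subst hx; exact Bool.eq_false_iff.mpr hs
      · exact hc x hx

theorem pvGW_append_space (a : List Char) : ∀ b cur,
    pvGW (a ++ ' ' :: b) cur = pvGW a cur ++ pvGW b [] := by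
  induction a with
  | nil =>
    intro b cur
    rw [List.nil_append, pvGW_cons_space b cur (by decide), pvGW_nil]
    split <;> simp
  | cons c a ih =>
    intro b cur
    by_cases hs : PySem.Chars.isspace c = true
    · rw [List.cons_append, pvGW_cons_space _ cur hs, pvGW_cons_space a cur hs]
      split <;> simp [ih]
    · rw [List.cons_append, pvGW_cons_nonspace _ cur (Bool.eq_false_iff.mpr hs),
        pvGW_cons_nonspace a cur (Bool.eq_false_iff.mpr hs)]
      exact ih b (c :: cur)

theorem pvGW_all_space (t : List Char) : ∀ cur, (∀ c ∈ t, PySem.Chars.isspace c = true) →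
    pvGW t cur = pvGW [] cur := by
  induction t with
  | nil => intro cur _; rfl
  | cons c t ih =>
    intro cur h
    rw [pvGW_cons_space t cur (h c (by simp)), ih [] (fun x hx => h x (by simp [hx])), pvGW_nil,
      pvGW_nil]
    split <;> simp

theorem pvGW_append_spaces (a : List Char) : ∀ t cur, (∀ c ∈ t, PySem.Chars.isspace c = true) →
    pvGW (a ++ t) cur = pvGW a cur := by
  induction a with
  | nil => intro t cur h; simpa using pvGW_all_space t cur h
  | cons c a ih =>
    intro t cur h
    by_cases hs : PySem.Chars.isspace c = true
    · rw [List.cons_append, pvGW_cons_space _ cur hs, pvGW_cons_space a cur hs]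
      split <;> simp [ih t [] h]
    · rw [List.cons_append, pvGW_cons_nonspace _ cur (Bool.eq_false_iff.mpr hs),
        pvGW_cons_nonspace a cur (Bool.eq_false_iff.mpr hs)]
      exact ih t (c :: cur) h

theorem pvGW_lstrip (s : List Char) : pvGW (List.dropWhile PySem.Chars.isspace s) [] = pvGW s [] := by
  induction s with
  | nil => rfl
  | cons c s ih =>
    by_cases h : PySem.Chars.isspace c = true
    · rw [List.dropWhile_cons_of_pos h, ih, pvGW_cons_space s [] h]
      simp
    · rw [List.dropWhile_cons_of_neg (by simp [h])]

theorem pvGW_strip (s : List Char) : pvGW (PySem.Chars.strip s) [] = pvGW s [] := by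
  unfold PySem.Chars.strip PySem.Chars.rstrip PySem.Chars.lstrip
  set m := List.dropWhile PySem.Chars.isspace s with hm
  have hdecomp : m = (List.dropWhile PySem.Chars.isspace m.reverse).reverse
      ++ (List.takeWhile PySem.Chars.isspace m.reverse).reverse := by
    rw [← List.reverse_append, List.takeWhile_append_dropWhile]
    simp
  calc pvGW (List.dropWhile PySem.Chars.isspace m.reverse).reverse []
      = pvGW ((List.dropWhile PySem.Chars.isspace m.reverse).reverse
          ++ (List.takeWhile PySem.Chars.isspace m.reverse).reverse) [] := by
        rw [pvGW_append_spaces]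
        intro c hc
        exact List.mem_takeWhile_imp (by simpa using hc)
    _ = pvGW m [] := by rw [← hdecomp]
    _ = pvGW s [] := pvGW_lstrip s

theorem pvStrip_of_all_space (t : List Char) (h : ∀ c ∈ t, PySem.Chars.isspace c = true) :
    PySem.Chars.strip t = [] := by
  unfold PySem.Chars.strip PySem.Chars.lstrip PySem.Chars.rstrip
  rw [List.dropWhile_eq_nil_iff.mpr (fun c hc => h c hc)]
  rfl

theorem pvStrip_eq_nil_iff (t : List Char) : PySem.Chars.strip t = [] ↔ pvGW t [] = [] := by
  constructor
  · intro h
    rw [← pvGW_strip, h]; rfl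
  · intro h
    exact pvStrip_of_all_space t (pvGW_eq_nil t [] h).2
theorem pvGo_acc (s : List Char) : ∀ cur acc,
    PySem.Chars.split₀.go s cur acc = acc.reverse ++ PySem.Chars.split₀.go s cur [] := by
  induction s with
  | nil => intro cur acc; simp [PySem.Chars.split₀.go]; split <;> simp
  | cons c s ih =>
    intro cur acc
    simp only [PySem.Chars.split₀.go]
    split
    · split
      · exact ih [] acc
      · rw [ih [] (cur.reverse :: acc), ih [] [cur.reverse]]; simp
    · exact ih _ _
theorem pvGW_go (s : List Char) : ∀ cur, PySem.Chars.split₀.go s cur [] = pvGW s cur := by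
  induction s with
  | nil => intro cur; simp [PySem.Chars.split₀.go, pvGW]
  | cons c s ih =>
    intro cur
    simp only [PySem.Chars.split₀.go, pvGW]
    split
    · split
      · exact ih []
      · rw [pvGo_acc]
        simp [ih []]
    · exact ih _
def pvSP : List Char → List Char → List (List Char)
  | [], cur => [cur.reverse]
  | c :: rest, cur => if c = '.' then cur.reverse :: pvSP rest [] else pvSP rest (c :: cur)
theorem pvSpGo_acc (fuel : Nat) : ∀ l cur acc, l.length < fuel →
    PySem.Chars.splitOn.go ['.'] fuel l cur acc
      = acc.reverse ++ PySem.Chars.splitOn.go ['.'] fuel l cur [] := by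
  induction fuel with
  | zero => intro l cur acc h; omega
  | succ fuel ih =>
    intro l cur acc h
    cases l with
    | nil => simp [PySem.Chars.splitOn.go]
    | cons c rest =>
      simp only [PySem.Chars.splitOn.go]
      split
      · rw [ih _ [] (cur.reverse :: acc) (by simp at h ⊢; omega),
          ih _ [] [cur.reverse] (by simp at h ⊢; omega)]
        simp
      · exact ih _ _ _ (by simp at h ⊢; omega)
theorem pvSP_go (fuel : Nat) : ∀ l cur, l.length < fuel →
    PySem.Chars.splitOn.go ['.'] fuel l cur [] = pvSP l cur := by
  induction fuel with
  | zero => intro l cur h; omega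
  | succ fuel ih =>
    intro l cur h
    cases l with
    | nil => simp [PySem.Chars.splitOn.go, pvSP]
    | cons c rest =>
      simp only [PySem.Chars.splitOn.go, pvSP]
      by_cases hc : c = '.'
      · rw [if_pos (by simp [hc, List.isPrefixOf]), if_pos hc]
        rw [pvSpGo_acc _ _ _ _ (by simp at h ⊢; omega), ih _ [] (by simp at h ⊢; omega)]
        simp
      · rw [if_neg (by simp [List.isPrefixOf]; intro h'; exact hc h'.symm), if_neg hc]
        exact ih _ _ (by simp at h ⊢; omega)
theorem pvReplGo (fuel : Nat) : ∀ l acc, l.length ≤ fuel →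
    PySem.Chars.replace.go ['.'] [' '] fuel l acc = acc.reverse ++ l.map pvF := by
  induction fuel with
  | zero =>
    intro l acc h
    have : l = [] := by cases l <;> simp_all
    subst this; simp [PySem.Chars.replace.go]
  | succ fuel ih =>
    intro l acc h
    cases l with
    | nil => simp [PySem.Chars.replace.go]
    | cons c rest =>
      simp only [PySem.Chars.replace.go]
      by_cases hc : c = '.'
      · rw [if_pos (by simp [hc, List.isPrefixOf])]
        rw [ih _ _ (by simp at h ⊢; omega)]
        simp [pvF, hc]
      · rw [if_neg (by simp [List.isPrefixOf]; intro h'; exact hc h'.symm)]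
        rw [ih _ _ (by simp at h ⊢; omega)]
        simp [pvF, hc]
theorem pvDropWhile_head_false {p : Char → Bool} {cs t : List Char} {c : Char}
    (h : List.dropWhile p cs = c :: t) : p c = false := by
  induction cs with
  | nil => simp at h
  | cons a l ih =>
    rw [List.dropWhile_cons] at h
    split at h
    · exact ih h
    · rename_i hp
      cases h
      simpa using hp

theorem pvSP_noDot (l : List Char) : ∀ cur, '.' ∉ l → pvSP l cur = [cur.reverse ++ l] := by
  induction l with
  | nil => intro cur _; simp [pvSP]
  | cons c l ih =>
    intro cur h
    have hc : c ≠ '.' := fun hc => h (by simp [hc])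
    simp only [pvSP, if_neg hc]
    rw [ih (c :: cur) (fun hm => h (by simp [hm]))]
    simp

theorem pvSP_split (a : List Char) : ∀ b cur, '.' ∉ a →
    pvSP (a ++ '.' :: b) cur = (cur.reverse ++ a) :: pvSP b [] := by
  induction a with
  | nil => intro b cur _; simp [pvSP]
  | cons c a ih =>
    intro b cur h
    have hc : c ≠ '.' := fun hc => h (by simp [hc])
    simp only [List.cons_append, pvSP, if_neg hc]
    rw [ih b (c :: cur) (fun hm => h (by simp [hm]))]
    simp

theorem pvRepl_main (n : Nat) : ∀ cs : List Char, cs.length ≤ n →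
    pvGW (cs.map pvF) [] = (pvSP cs []).flatMap (fun p => pvGW p []) := by
  induction n with
  | zero =>
    intro cs h
    have : cs = [] := by cases cs <;> simp_all
    subst this; simp [pvSP, pvGW]
  | succ n ih =>
    intro cs h
    by_cases hd : '.' ∈ cs
    · obtain ⟨a, b, hab, hna⟩ : ∃ a b, cs = a ++ '.' :: b ∧ '.' ∉ a := by
        refine ⟨cs.takeWhile (fun c => c ≠ '.'), (cs.dropWhile (fun c => c ≠ '.')).tail, ?_, ?_⟩
        · have hne : cs.dropWhile (fun c => c ≠ '.') ≠ [] := by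
            intro hnil
            have := List.dropWhile_eq_nil_iff.mp hnil '.' hd
            simp at this
          obtain ⟨c, t, hct⟩ := List.exists_cons_of_ne_nil hne
          have hc : c = '.' := by simpa using pvDropWhile_head_false hct
          conv_lhs => rw [← List.takeWhile_append_dropWhile (p := fun c => decide (c ≠ '.')) (l := cs)]
          rw [hct, hc]
          simp
        · intro hm
          have := List.mem_takeWhile_imp hm
          simp at this
      subst hab
      have hb : b.length ≤ n := by simp at h; omega
      have hmap : (a ++ '.' :: b).map pvF = a ++ ' ' :: b.map pvF := by
        have ha : a.map pvF = a := by
          refine (List.map_congr_left (fun c hc => ?_)).trans (List.map_id a)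
          have : c ≠ '.' := fun h' => hna (h' ▸ hc)
          simp [pvF, this]
        simp [List.map_append, List.map_cons, ha, pvF]
      rw [hmap, pvGW_append_space, pvSP_split a b [] hna, ih b hb]
      simp
    · have hmap : cs.map pvF = cs := by
        refine (List.map_congr_left (fun c hc => ?_)).trans (List.map_id cs)
        have : c ≠ '.' := fun h' => hd (h' ▸ hc)
        simp [pvF, this]
      rw [hmap, pvSP_noDot cs [] hd]
      simp
theorem pvSplit₀_eq (s : List Char) : PySem.Chars.split₀ s = pvGW s [] := pvGW_go s []

theorem pvSplitOn_eq (l : List Char) : PySem.Chars.splitOn l ['.'] = pvSP l [] := by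
  unfold PySem.Chars.splitOn
  exact pvSP_go _ _ _ (by omega)

theorem pvReplace_eq (l : List Char) :
    PySem.Chars.replace l ['.'] [' '] = l.map pvF := by
  unfold PySem.Chars.replace
  rw [if_neg (by simp)]
  exact pvReplGo _ _ _ (le_refl _)

theorem pvFilter_flat (pieces : List (List Char)) :
    (((pieces.map PySem.Chars.strip).filter (fun s => !s.isEmpty)).flatMap (fun p => pvGW p []))
      = pieces.flatMap (fun p => pvGW p []) := by
  induction pieces with
  | nil => rfl
  | cons p rest ih =>
    simp only [List.map_cons, List.filter_cons]
    by_cases hp : PySem.Chars.strip p = []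
    · have h0 : pvGW p [] = [] := by rw [← pvGW_strip, hp]; rfl
      simp [hp, ih, h0]
    · rw [if_pos (by simp [hp])]
      simp only [List.flatMap_cons, ih, pvGW_strip]

theorem pvALoop_take (sentences : List (List Char)) : ∀ acc : List (List Char), acc.length ≤ 150 →
    pvALoop sentences acc = (acc ++ sentences.flatMap (fun s => PySem.Chars.split₀ s)).take 150 := by
  induction sentences with
  | nil =>
    intro acc h
    simp [pvALoop, List.take_of_length_le (by simpa using h)]
  | cons s rest ih =>
    intro acc h
    simp only [pvALoop]
    set ws := PySem.Chars.split₀ s with hws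
    by_cases hle : (acc.length : Int) + (ws.length : Int) ≤ 150
    · rw [if_pos hle, ih (acc ++ ws) (by simp at hle ⊢; omega)]
      rw [List.flatMap_cons, ← hws, List.append_assoc]
    · rw [if_neg hle]
      have hlt : 150 < acc.length + ws.length := by omega
      by_cases hrem : (150 : Int) - (acc.length : Int) > 0
      · rw [if_pos hrem]
        have hacc : acc.length ≤ 150 := h
        rw [PySem.List.slice_to ws (by omega)]
        have htn : ((150 : Int) - (acc.length : Int)).toNat = 150 - acc.length := by omega
        rw [htn]
        rw [List.flatMap_cons, ← hws, ← List.append_assoc, List.take_append,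
          List.take_append, List.take_of_length_le (l := acc) (i := 150) (by omega)]
        have h1 : 150 - (acc ++ ws).length = 0 := by simp; omega
        have h2 : List.take (150 - acc.length) ws = ws.take (150 - acc.length) := rfl
        rw [h1, List.take_zero, List.append_nil]
      · rw [if_neg hrem]
        have hacc : acc.length = 150 := by
          simp at hrem
          omega
        rw [List.take_append, List.take_of_length_le (l := acc) (i := 150) (by omega), hacc]
        simp

theorem pvJoin_split (ws : List (List Char))
    (h : ∀ w ∈ ws, w ≠ [] ∧ ∀ c ∈ w, PySem.Chars.isspace c = false) :
    pvGW (PySem.Chars.join [' '] ws) [] = ws := by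
  induction ws with
  | nil => rw [PySem.Chars.join_nil]; rfl
  | cons w rest ih =>
    cases rest with
    | nil =>
      rw [PySem.Chars.join_singleton]
      rw [pvGW_all_nonspace w (h w (by simp)).2]
      simp [(h w (by simp)).1]
    | cons x rs =>
      rw [PySem.Chars.join_cons_cons]
      have he : w ++ [' '] ++ PySem.Chars.join [' '] (x :: rs)
          = w ++ ' ' :: PySem.Chars.join [' '] (x :: rs) := by simp
      rw [he, pvGW_append_space]
      rw [ih (fun v hv => h v (by simp [hv]))]
      rw [pvGW_all_nonspace w (h w (by simp)).2]
      simp [(h w (by simp)).1]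

-- ===== VERDICT (by name: the statement is the Claim_ definition above) =====
theorem create_index_summary_py_spec : Claim_equal_create_index_summary_py := by
  intro text _
  unfold Spec_create_index_summary_py create_index_summary_py create_index_summary_py_alt
  set cs := text.toList with hcs
  have hwords : PySem.Chars.split₀ (PySem.Chars.replace cs ['.'] [' '])
      = (((PySem.Chars.splitOn cs ['.']).map PySem.Chars.strip).filter (fun s => !s.isEmpty)).flatMap
          (fun s => PySem.Chars.split₀ s) := by
    rw [pvReplace_eq, pvSplit₀_eq, pvRepl_main cs.length cs (le_refl _), pvSplitOn_eq]
    rw [show (fun s => PySem.Chars.split₀ s) = (fun p => pvGW p []) from funext pvSplit₀_eq]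
    rw [pvFilter_flat]
  set sentences := ((PySem.Chars.splitOn cs ['.']).map PySem.Chars.strip).filter (fun s => !s.isEmpty)
    with hsent
  set W := sentences.flatMap (fun s => PySem.Chars.split₀ s) with hW
  by_cases hnil : sentences = []
  · have hz : PySem.Chars.split₀ (PySem.Chars.replace cs ['.'] [' ']) = [] := by
      rw [hwords, hW, hnil]; rfl
    simp [hnil, hz]
  · obtain ⟨s0, rest, hs0⟩ := List.exists_cons_of_ne_nil hnil
    have hs0mem : s0 ∈ sentences := by rw [hs0]; simp
    have hs0ne : s0 ≠ [] := by
      have := List.of_mem_filter hs0mem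
      simpa [List.isEmpty_iff] using this
    obtain ⟨p, hpmem, hps⟩ : ∃ p, p ∈ (PySem.Chars.splitOn cs ['.']) ∧ PySem.Chars.strip p = s0 := by
      have hmf := List.mem_filter.mp hs0mem
      obtain ⟨p, hp, hps⟩ := List.mem_map.mp hmf.1
      exact ⟨p, hp, hps⟩
    have hsplit0 : PySem.Chars.split₀ s0 ≠ [] := by
      intro hz
      apply hs0ne
      rw [← hps] at hz ⊢
      rw [pvSplit₀_eq, pvGW_strip] at hz
      rw [pvStrip_eq_nil_iff p |>.mpr hz]
    have hWne : W ≠ [] := by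
      rw [hW, hs0]
      simp only [List.flatMap_cons]
      intro hz
      exact hsplit0 (by simpa using (List.append_eq_nil_iff.mp hz).1)
    have hwordsW : PySem.Chars.split₀ (PySem.Chars.replace cs ['.'] [' ']) = W := hwords
    have hWel : ∀ w ∈ W, w ≠ [] ∧ ∀ c ∈ w, PySem.Chars.isspace c = false := by
      intro w hw
      rw [← hwordsW, pvSplit₀_eq] at hw
      exact pvGW_elems _ [] (by simp) w hw
    have hloop : pvALoop sentences [] = W.take 150 := by
      rw [pvALoop_take sentences [] (by simp)]
      rw [hW, List.nil_append]
    have hjoin : PySem.Chars.split₀ (PySem.Chars.join [' '] (W.take 150)) = W.take 150 := by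
      rw [pvSplit₀_eq]
      exact pvJoin_split _ (fun w hw => hWel w (List.mem_of_mem_take hw))
    simp only [hwordsW, hloop, hjoin]
    have hWlen : (W.take 150).length = min 150 W.length := by simp
    have hA1 : sentences.isEmpty ≠ true := by simp [List.isEmpty_iff, hnil]
    have hB1 : W.isEmpty ≠ true := by simp [List.isEmpty_iff, hWne]
    rw [if_neg hA1, if_neg hB1]
    have hiff : (((W.take 150).length : Int) < 50) ↔ ((W.length : Int) < 50) := by
      rw [hWlen]; push_cast; omega
    by_cases h50 : ((W.length : Int) < 50)
    · rw [if_pos (hiff.mpr h50), if_pos h50]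
    · rw [if_neg (fun hc => h50 (hiff.mp hc)), if_neg h50]
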